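-- pv_equiv track=rewrite | github.com/pietromagaldi/MC102 | lab06.py | divide_vetores
-- ===== SOURCE A (Python) =====
-- def divide_vetores(v1: list[int], v2: list[int]) -> list[int]:
--     """
--     Realiza a divisão inteira elemento a elemento de dois vetores
--     :param v1: vetor 1
--     :param v2: vetor 2
--     :return: vetor resultante
--     """
--     v3 = []
--     for i in range(max(len(v1), len(v2))):
--         try:
--             v3.append(v1[i] // v2[i])
--         except IndexError:
--             try:
--                 v3.append(v1[i])
--             except IndexError:
--                 v3.append(0)
--     return v3
-- ===== SOURCE B (Python) =====
-- def divide_vetores(v1: list[int], v2: list[int]) -> list[int]: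
--     """
--     Realiza a divisão inteira elemento a elemento de dois vetores
--     :param v1: vetor 1
--     :param v2: vetor 2
--     :return: vetor resultante
--     """
--     head = [a // b for a, b in zip(v1, v2)]
--     if len(v1) > len(v2):
--         return head + v1[len(v2):]
--     return head + [0] * (len(v2) - len(v1))
-- ===== Notes on version B (the rewrite author's own statement) =====
-- stated objective: simpler
-- what changed: Replaces the index loop over max(len) with nested try/except by a zip comprehension for the overlap plus a one-shot tail (slice of v1 or a block of zeros).
import Mathlib
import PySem

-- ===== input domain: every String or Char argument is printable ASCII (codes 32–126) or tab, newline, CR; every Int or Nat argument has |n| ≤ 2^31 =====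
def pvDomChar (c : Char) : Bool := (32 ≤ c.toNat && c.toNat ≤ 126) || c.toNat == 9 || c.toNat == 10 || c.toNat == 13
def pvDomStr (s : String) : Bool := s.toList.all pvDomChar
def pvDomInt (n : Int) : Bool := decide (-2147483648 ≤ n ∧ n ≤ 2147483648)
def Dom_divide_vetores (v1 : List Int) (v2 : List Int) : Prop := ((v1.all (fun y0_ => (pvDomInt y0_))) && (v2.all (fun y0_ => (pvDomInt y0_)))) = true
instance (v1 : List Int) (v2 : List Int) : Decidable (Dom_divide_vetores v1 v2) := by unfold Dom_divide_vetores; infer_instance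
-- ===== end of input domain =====

-- B replaces A's index loop over max(len) with nested try/except by a zip of the overlap
-- plus a one-shot tail (slice of v1 or a block of zeros) — objective: simpler.


-- ===== PORT A =====
def divide_vetores (v1 : List Int) (v2 : List Int) : List Int :=
  (PySem.List.pyRange 0 (max (v1.length : Int) (v2.length : Int)) 1).foldl
    (fun v3 i =>
      match PySem.List.pyGet? v1 i, PySem.List.pyGet? v2 i with
      | some a, some b => v3 ++ [PySem.Int.floordiv a b]   -- try: v3.append(v1[i] // v2[i])
      | some a, none   => v3 ++ [a]                        -- except IndexError (from v2[i]): v3.append(v1[i])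
      | none,   _      => v3 ++ [0])                       -- v1[i] raises both times: v3.append(0)
    []

-- ===== PORT B =====
def divide_vetores_alt (v1 : List Int) (v2 : List Int) : List Int :=
  let head := List.zipWith PySem.Int.floordiv v1 v2
  if v2.length < v1.length then
    head ++ PySem.List.slice v1 (some (v2.length : Int)) none
  else
    head ++ List.replicate (v2.length - v1.length) 0

-- ===== PRECONDITION & SPEC =====
-- A raises ZeroDivisionError exactly when some divisor in the overlapping prefix of v2 is zero.
def Pre_divide_vetores (v1 : List Int) (v2 : List Int) : Prop := (0 : Int) ∉ v2.take v1.length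
instance (v1 : List Int) (v2 : List Int) : Decidable (Pre_divide_vetores v1 v2) := by unfold Pre_divide_vetores; infer_instance
def pvWitness_divide_vetores : List Int × List Int := ([7, 8, 9], [2, 3])

def Spec_divide_vetores (v1 : List Int) (v2 : List Int) (out : List Int) : Prop := out = divide_vetores_alt v1 v2
instance (v1 : List Int) (v2 : List Int) (out : List Int) : Decidable (Spec_divide_vetores v1 v2 out) := by unfold Spec_divide_vetores; infer_instance

-- ===== CLAIM (what is proved, stated in full; the proofs are below) =====
def Claim_equal_divide_vetores : Prop := ∀ (v1 : List Int) (v2 : List Int), Dom_divide_vetores v1 v2 → Pre_divide_vetores v1 v2 → Spec_divide_vetores v1 v2 (divide_vetores v1 v2)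

-- ===== LEMMAS AND PROOFS =====

-- the single element A appends at index i
def pvElemA (v1 v2 : List Int) (i : Int) : Int :=
  match PySem.List.pyGet? v1 i, PySem.List.pyGet? v2 i with
  | some a, some b => PySem.Int.floordiv a b
  | some a, none   => a
  | none,   _      => 0

theorem divide_vetores_eq_map (v1 v2 : List Int) :
    divide_vetores v1 v2 =
      (List.range (max v1.length v2.length)).map (fun k : Nat => pvElemA v1 v2 (k : Int)) := by
  unfold divide_vetores
  have hfun : (fun (v3 : List Int) (i : Int) =>
      match PySem.List.pyGet? v1 i, PySem.List.pyGet? v2 i with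
      | some a, some b => v3 ++ [PySem.Int.floordiv a b]
      | some a, none   => v3 ++ [a]
      | none,   _      => v3 ++ [0]) =
      (fun v3 i => v3 ++ [pvElemA v1 v2 i]) := by
    funext v3 i
    unfold pvElemA
    cases PySem.List.pyGet? v1 i <;> cases PySem.List.pyGet? v2 i <;> rfl
  rw [hfun]
  rw [show (max (v1.length : Int) (v2.length : Int)) = ((max v1.length v2.length : Nat) : Int) by push_cast; rfl]
  rw [PySem.List.pyRange_zero_nat, List.foldl_map]
  simpa using PySem.List.foldl_append_singleton_eq_map (fun k : Nat => pvElemA v1 v2 (k : Int)) (List.range (max v1.length v2.length)) []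

theorem alt_cons (a b : Int) (t1 t2 : List Int) :
    divide_vetores_alt (a :: t1) (b :: t2) = PySem.Int.floordiv a b :: divide_vetores_alt t1 t2 := by
  unfold divide_vetores_alt
  rw [PySem.List.slice_from _ (by positivity), PySem.List.slice_from _ (by positivity)]
  simp only [List.length_cons, List.zipWith_cons_cons, Int.toNat_natCast, List.drop_succ_cons]
  split_ifs with h1 h2 h2
  · rfl
  · omega
  · omega
  · simp [Nat.succ_sub_succ]

theorem map_elem_eq_alt (v1 v2 : List Int) :
    (List.range (max v1.length v2.length)).map (fun k : Nat => pvElemA v1 v2 (k : Int)) =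
      divide_vetores_alt v1 v2 := by
  induction v1 generalizing v2 with
  | nil =>
    have hz : ∀ k : Nat, pvElemA [] v2 (k : Int) = 0 := by
      intro k; unfold pvElemA; simp
    calc (List.range (max ([] : List Int).length v2.length)).map (fun k : Nat => pvElemA [] v2 (k : Int))
        = (List.range v2.length).map (fun _ => (0 : Int)) := by
          simp only [List.length_nil, Nat.zero_max]
          exact List.map_congr_left (fun k _ => hz k)
      _ = List.replicate v2.length 0 := by simp [List.map_const']
      _ = divide_vetores_alt [] v2 := by simp [divide_vetores_alt]
  | cons a t1 ih =>
    cases v2 with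
    | nil =>
      apply List.ext_getElem
      · simp [divide_vetores_alt, PySem.List.slice_from _ (le_refl 0)]
      · intro i h1 h2
        have hi : i < (a :: t1).length := by simpa using h1
        simp only [List.getElem_map, List.getElem_range]
        unfold pvElemA
        rw [PySem.List.pyGet?_natCast, PySem.List.pyGet?_natCast]
        simp only [List.getElem?_nil, List.getElem?_eq_getElem hi]
        have : (a :: t1)[i] = (divide_vetores_alt (a :: t1) [])[i] := by
          simp [divide_vetores_alt, PySem.List.slice_from _ (le_refl 0)]
        simpa using this
    | cons b t2 =>
      have hstep : ∀ k : Nat, pvElemA (a :: t1) (b :: t2) ((k + 1 : Nat) : Int) = pvElemA t1 t2 (k : Int) := by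
        intro k; unfold pvElemA
        rw [PySem.List.pyGet?_natCast, PySem.List.pyGet?_natCast,
            PySem.List.pyGet?_natCast, PySem.List.pyGet?_natCast]
        simp
      have h0 : pvElemA (a :: t1) (b :: t2) ((0 : Nat) : Int) = PySem.Int.floordiv a b := by
        unfold pvElemA; simp
      calc (List.range (max (a :: t1).length (b :: t2).length)).map
              (fun k : Nat => pvElemA (a :: t1) (b :: t2) (k : Int))
          = (List.range (max t1.length t2.length + 1)).map
              (fun k : Nat => pvElemA (a :: t1) (b :: t2) (k : Int)) := by
            simp [Nat.succ_max_succ]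
        _ = PySem.Int.floordiv a b ::
              (List.range (max t1.length t2.length)).map (fun k : Nat => pvElemA t1 t2 (k : Int)) := by
            rw [List.range_succ_eq_map]
            simp only [List.map_cons, List.map_map, h0]
            congr 1
            funext
            apply List.map_congr_left
            intro k _
            simpa using hstep k
        _ = divide_vetores_alt (a :: t1) (b :: t2) := by rw [ih, alt_cons]

-- ===== VERDICT (by name: the statement is the Claim_ definition above) =====
theorem divide_vetores_spec : Claim_equal_divide_vetores := by
  intro v1 v2 _ _
  unfold Spec_divide_vetores
  rw [divide_vetores_eq_map, map_elem_eq_alt]
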